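-- pv_equiv track=rewrite | github.com/Buitragox/competitive-programming | online-judge/6th-semester/hw3/1153.py | choose_orders
-- ===== SOURCE A (Python) =====
-- from heapq import heappush, heappop, heappushpop
--
-- def choose_orders(order_list):
--     order_list.sort() #Better to sort than use heap
--     ans = 0
--     accepted = []
--
--     acum_time = 0
--     for i in range(len(order_list)):
--         due_date, time = order_list[i]
--         if acum_time + time <= due_date: #If can add it, do it
--             acum_time += time
--             heappush(accepted, -time)
--             ans += 1
--         elif len(accepted) > 0: #Try to upgrade the acummulated finish time
--             t = -accepted[0]
--             #Remove 't', add 'time'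
--             if acum_time + time - t < acum_time:
--                 acum_time += (time - t)
--                 heappushpop(accepted, -time) #not that much better
--                 # heappop(accepted)
--                 # heappush(accepted, -time)
--     return ans
-- ===== SOURCE B (Python) =====
-- def choose_orders(order_list):
--     order_list.sort()
--     ans = 0
--     accepted = []  # plain list of accepted times; we only ever need its maximum
--     acum_time = 0
--     for due_date, time in order_list:
--         if acum_time + time <= due_date:
--             accepted.append(time)
--             acum_time += time
--             ans += 1
--         elif accepted:
--             t = max(accepted)
--             if time < t:  # swapping the longest accepted order for this one helps
--                 accepted.remove(t)
--                 accepted.append(time)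
--                 acum_time += time - t
--     return ans
-- ===== Notes on version B (the rewrite author's own statement) =====
-- stated objective: simpler
-- what changed: Replaced the negated max-heap (heappush/heappushpop with sign flipping and the 'acum+time-t < acum' test) by a plain list of accepted times whose maximum is found with a linear max() scan, removed with remove(), and compared directly via 'time < t'.
import Mathlib
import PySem

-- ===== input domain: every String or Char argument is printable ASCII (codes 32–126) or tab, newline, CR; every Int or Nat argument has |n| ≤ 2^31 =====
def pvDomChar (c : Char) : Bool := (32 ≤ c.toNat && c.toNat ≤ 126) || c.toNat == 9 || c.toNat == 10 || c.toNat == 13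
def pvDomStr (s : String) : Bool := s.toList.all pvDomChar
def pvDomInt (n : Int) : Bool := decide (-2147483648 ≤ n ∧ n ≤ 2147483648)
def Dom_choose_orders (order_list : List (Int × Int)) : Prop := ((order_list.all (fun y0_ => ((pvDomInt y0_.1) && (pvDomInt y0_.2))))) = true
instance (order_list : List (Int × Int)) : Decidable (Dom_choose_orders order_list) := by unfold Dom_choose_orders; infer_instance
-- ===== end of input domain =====

-- B replaces A's negated max-heap by a plain list scanned with max(); equivalence is about the
-- RETURN value only (both Pythons sort order_list in place, identically).

-- ===== PORT A =====
-- heapq is ported by its multiset contract: the heap root accepted[0] is the minimum element;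
-- this is exact for every value A's code observes (only the root and the multiset are ever read).
def pvHeapTop (h : List Int) : Int :=
  match h with
  | [] => 0            -- never reached: guarded by len(accepted) > 0
  | x :: xs => xs.foldl min x

def pvHeapPush (h : List Int) (v : Int) : List Int := h ++ [v]

def pvHeapPushPop (h : List Int) (v : Int) : List Int :=
  if v ≤ pvHeapTop h then h
  else ((PySem.List.remove? h (pvHeapTop h)).getD h) ++ [v]

def chooseStepA (st : Int × Int × List Int) (o : Int × Int) : Int × Int × List Int :=
  let ans := st.1; let acum_time := st.2.1; let accepted := st.2.2
  let due_date := o.1; let time := o.2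
  if acum_time + time ≤ due_date then
    (ans + 1, acum_time + time, pvHeapPush accepted (-time))
  else if accepted.length > 0 then
    let t := -(pvHeapTop accepted)
    if acum_time + time - t < acum_time then
      (ans, acum_time + (time - t), pvHeapPushPop accepted (-time))
    else st
  else st

def choose_orders (order_list : List (Int × Int)) : Int :=
  ((PySem.List.sorted2 order_list (·.1) (·.2)).foldl chooseStepA (0, 0, [])).1

-- ===== PORT B =====
def pvListMax (l : List Int) : Int :=
  match l with
  | [] => 0            -- never reached: guarded by 'elif accepted'
  | x :: xs => xs.foldl max x

def chooseStepB (st : Int × Int × List Int) (o : Int × Int) : Int × Int × List Int :=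
  let ans := st.1; let acum_time := st.2.1; let accepted := st.2.2
  if acum_time + o.2 ≤ o.1 then
    (ans + 1, acum_time + o.2, accepted ++ [o.2])
  else if accepted ≠ [] then
    let t := pvListMax accepted
    if o.2 < t then
      (ans, acum_time + (o.2 - t), ((PySem.List.remove? accepted t).getD accepted) ++ [o.2])
    else st
  else st

def choose_orders_alt (order_list : List (Int × Int)) : Int :=
  ((PySem.List.sorted2 order_list (·.1) (·.2)).foldl chooseStepB (0, 0, [])).1

-- ===== PRECONDITION & SPEC =====
def Spec_choose_orders (order_list : List (Int × Int)) (out : Int) : Prop := out = choose_orders_alt order_list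
instance (order_list : List (Int × Int)) (out : Int) : Decidable (Spec_choose_orders order_list out) := by unfold Spec_choose_orders; infer_instance

-- ===== CLAIM (what is proved, stated in full; the proofs are below) =====
def Claim_equal_choose_orders : Prop := ∀ (order_list : List (Int × Int)), Dom_choose_orders order_list → Spec_choose_orders order_list (choose_orders order_list)

-- ===== LEMMAS AND PROOFS =====

-- the heap of negated times is pointwise the negation of B's list of times
lemma foldl_min_neg (xs : List Int) (x : Int) :
    (xs.map (fun a => -a)).foldl min (-x) = -(xs.foldl max x) := by
  induction xs generalizing x with
  | nil => simp
  | cons y ys ih =>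
    have h : min (-x) (-y) = -(max x y) := by
      rcases le_total x y with h | h <;> simp [h, neg_le_neg_iff]
    simp only [List.map_cons, List.foldl_cons, h, ih]

lemma heapTop_map_neg (l : List Int) :
    pvHeapTop (l.map (fun x => -x)) = -(pvListMax l) := by
  cases l with
  | nil => simp [pvHeapTop, pvListMax]
  | cons x xs => simpa [pvHeapTop, pvListMax] using foldl_min_neg xs x

lemma remove?_map_neg (l : List Int) (v : Int) :
    PySem.List.remove? (l.map (fun x => -x)) (-v) =
      (PySem.List.remove? l v).map (List.map (fun x => -x)) := by
  induction l with
  | nil => simp [PySem.List.remove?]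
  | cons x xs ih =>
    by_cases h : x = v
    · subst h; simp [PySem.List.remove?_cons_self]
    · rw [List.map_cons, PySem.List.remove?_cons_of_ne _ (show (-x : Int) ≠ -v by omega),
        PySem.List.remove?_cons_of_ne _ h, ih]
      cases PySem.List.remove? xs v <;> simp

-- the loop invariant: A's state is B's state with the accepted list negated
lemma step_rel (ans acum : Int) (acc : List Int) (o : Int × Int) :
    chooseStepA (ans, acum, acc.map (fun x => -x)) o =
      (fun st => (st.1, st.2.1, st.2.2.map (fun x => -x))) (chooseStepB (ans, acum, acc) o) := by
  simp only [chooseStepA, chooseStepB]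
  by_cases h1 : acum + o.2 ≤ o.1
  · simp [h1, pvHeapPush]
  · simp only [if_neg h1, pvHeapPushPop]
    rw [heapTop_map_neg, remove?_map_neg]
    simp only [neg_neg]
    by_cases hacc : acc = []
    · subst hacc; simp
    · have hlen : 0 < (acc.map (fun x => -x)).length := by
        simpa [List.length_pos_iff] using hacc
      by_cases h2 : o.2 < pvListMax acc
      · have hc2 : acum + o.2 - pvListMax acc < acum := by omega
        have hc3 : ¬ (-o.2 ≤ -pvListMax acc) := by omega
        simp only [if_pos hlen, if_pos hc2, if_pos (show acc ≠ [] from hacc), if_pos h2,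
          if_neg hc3]
        cases PySem.List.remove? acc (pvListMax acc) <;> simp
      · have hc2 : ¬ (acum + o.2 - pvListMax acc < acum) := by omega
        simp [hacc, hc2, h2]

lemma foldl_rel (l : List (Int × Int)) (ans acum : Int) (acc : List Int) :
    l.foldl chooseStepA (ans, acum, acc.map (fun x => -x)) =
      (fun st => (st.1, st.2.1, st.2.2.map (fun x => -x))) (l.foldl chooseStepB (ans, acum, acc)) := by
  induction l generalizing ans acum acc with
  | nil => rfl
  | cons o os ih =>
    simp only [List.foldl_cons, step_rel]
    obtain ⟨a, c, s⟩ := chooseStepB (ans, acum, acc) o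
    exact ih a c s

-- ===== VERDICT (by name: the statement is the Claim_ definition above) =====
theorem choose_orders_spec : Claim_equal_choose_orders := by
  intro order_list _
  show choose_orders order_list = choose_orders_alt order_list
  unfold choose_orders choose_orders_alt
  have h := foldl_rel (PySem.List.sorted2 order_list (·.1) (·.2)) 0 0 []
  simp only [List.map_nil] at h
  rw [h]
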